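-- pv_equiv track=rewrite | github.com/deno101/SudokuSolver | sudoku.py | getMissing
-- ===== SOURCE A (Python) =====
-- def getMissing(array):
--     complete = {1, 2, 3, 4, 5, 6, 7, 8, 9}
--     set1 = set()
--
--     for x in array:
--         for y in x:
--             if not y == 0:
--                 set1.add(y)
--
--     # largerSet.difference(smallerSet)
--     return complete.difference(set1)
-- ===== SOURCE B (Python) =====
-- def getMissing(array):
--     return {d for d in range(1, 10) if not any(d in row for row in array)}
-- ===== Notes on version B (the rewrite author's own statement) =====
-- stated objective: simpler
-- what changed: Replaces the build-a-present-set-then-set-difference pass with a one-line per-digit scan: for each candidate digit 1..9 test whether it occurs in any row.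
import Mathlib
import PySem

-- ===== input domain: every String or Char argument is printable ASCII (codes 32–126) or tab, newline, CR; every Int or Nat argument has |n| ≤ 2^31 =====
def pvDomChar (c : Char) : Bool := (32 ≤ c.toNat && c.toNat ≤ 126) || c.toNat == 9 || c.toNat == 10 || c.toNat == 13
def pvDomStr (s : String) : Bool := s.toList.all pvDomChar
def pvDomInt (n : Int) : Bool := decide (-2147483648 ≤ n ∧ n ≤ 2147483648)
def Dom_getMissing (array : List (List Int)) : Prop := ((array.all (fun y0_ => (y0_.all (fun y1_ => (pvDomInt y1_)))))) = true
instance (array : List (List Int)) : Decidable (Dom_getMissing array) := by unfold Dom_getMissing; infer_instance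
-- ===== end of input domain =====

-- B replaces A's present-set accumulator + set difference with a per-digit scan over the rows (objective: simpler).
-- ===== PORT A =====
def getMissing (array : List (List Int)) : List Int :=
  let complete : PySem.Set Int := PySem.Set.ofList [1, 2, 3, 4, 5, 6, 7, 8, 9]
  let set1 : PySem.Set Int :=
    array.foldl (fun s x =>
      x.foldl (fun s y => if !(y == 0) then PySem.Set.add s y else s) s) PySem.Set.empty
  PySem.Set.diff complete set1

-- ===== PORT B =====
def getMissing_alt (array : List (List Int)) : List Int :=
  (PySem.List.pyRange 1 10).filter (fun d => !(array.any (fun row => row.contains d)))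

-- ===== PRECONDITION & SPEC =====
def Spec_getMissing (array : List (List Int)) (out : List Int) : Prop := out = getMissing_alt array
instance (array : List (List Int)) (out : List Int) : Decidable (Spec_getMissing array out) := by unfold Spec_getMissing; infer_instance

-- ===== CLAIM (what is proved, stated in full; the proofs are below) =====
def Claim_equal_getMissing : Prop := ∀ (array : List (List Int)), Dom_getMissing array → Spec_getMissing array (getMissing array)

-- ===== LEMMAS AND PROOFS =====

-- ===== VERDICT (by name: the statement is the Claim_ definition above) =====
-- membership in the inner-loop accumulator
lemma mem_inner (x : List Int) (s : PySem.Set Int) (y : Int) :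
    y ∈ x.foldl (fun s y => if !(y == 0) then PySem.Set.add s y else s) s ↔
      y ∈ s ∨ (y ∈ x ∧ y ≠ 0) := by
  induction x generalizing s with
  | nil => simp
  | cons a t ih =>
    simp only [List.foldl_cons, ih, List.mem_cons]
    split_ifs with h
    · simp only [Bool.not_eq_eq_eq_not, Bool.not_true, beq_eq_false_iff_ne, ne_eq] at h
      rw [PySem.Set.mem_add]
      constructor
      · rintro ((hs | rfl) | ht) <;> tauto
      · rintro (hs | ⟨(rfl | ht), hne⟩) <;> tauto
    · simp only [Bool.not_eq_eq_eq_not, Bool.not_true, beq_eq_false_iff_ne, ne_eq,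
        not_not] at h
      subst h
      constructor
      · rintro (hs | ht) <;> tauto
      · rintro (hs | ⟨(rfl | ht), hne⟩) <;> tauto

-- membership in the outer-loop accumulator
lemma mem_outer (array : List (List Int)) (s : PySem.Set Int) (y : Int) :
    y ∈ array.foldl (fun s x =>
        x.foldl (fun s y => if !(y == 0) then PySem.Set.add s y else s) s) s ↔
      y ∈ s ∨ ∃ row ∈ array, y ∈ row ∧ y ≠ 0 := by
  induction array generalizing s with
  | nil => simp
  | cons x t ih =>
    simp only [List.foldl_cons, ih, mem_inner, List.mem_cons]
    constructor
    · rintro ((hs | h) | ⟨r, hr, h⟩)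
      · tauto
      · exact Or.inr ⟨x, Or.inl rfl, h⟩
      · exact Or.inr ⟨r, Or.inr hr, h⟩
    · rintro (hs | ⟨r, (rfl | hr), h⟩)
      · tauto
      · exact Or.inl (Or.inr h)
      · exact Or.inr ⟨r, hr, h⟩

-- ===== VERDICT (by name: the statement is the Claim_ definition above) =====
theorem getMissing_spec : Claim_equal_getMissing := by
  intro array _
  unfold Spec_getMissing getMissing getMissing_alt
  have hrange : PySem.List.pyRange 1 10 = ([1,2,3,4,5,6,7,8,9] : List Int) := by decide
  have hcomplete : PySem.Set.ofList ([1,2,3,4,5,6,7,8,9] : List Int)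
      = ([1,2,3,4,5,6,7,8,9] : List Int) := by decide
  rw [hrange]
  show PySem.Set.diff _ _ = _
  rw [PySem.Set.diff, hcomplete]
  apply List.filter_congr
  intro d hd
  have hdne : d ≠ 0 := by
    fin_cases hd <;> decide
  congr 1
  have hc := PySem.Set.contains_iff
    (s := array.foldl (fun s x =>
      x.foldl (fun s y => if !(y == 0) then PySem.Set.add s y else s) s) PySem.Set.empty)
    (x := d)
  have hmem := mem_outer array PySem.Set.empty d
  simp only [PySem.Set.empty, List.not_mem_nil, false_or] at hmem
  by_cases hin : ∃ row ∈ array, d ∈ row ∧ d ≠ 0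
  · have h1 : PySem.Set.contains _ d = true := hc.mpr (hmem.mpr hin)
    rw [h1]
    obtain ⟨r, hr, hdr, -⟩ := hin
    have : array.any (fun row => row.contains d) = true := by
      simp only [List.any_eq_true]
      exact ⟨r, hr, by simpa using hdr⟩
    rw [this]
  · have h1 : PySem.Set.contains (array.foldl (fun s x =>
        x.foldl (fun s y => if !(y == 0) then PySem.Set.add s y else s) s)
        PySem.Set.empty) d = false := by
      rw [Bool.eq_false_iff]
      intro h; exact hin (hmem.mp (hc.mp h))
    rw [h1]
    have : array.any (fun row => row.contains d) = false := by
      rw [Bool.eq_false_iff]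
      simp only [List.any_eq_true, ne_eq]
      rintro ⟨r, hr, hdr⟩
      exact hin ⟨r, hr, by simpa using hdr, hdne⟩
    rw [this]
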